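-- pv_equiv track=rewrite | github.com/nataliarampon/advent-of-code | 2024/two/dayTwo.py | isReportSafeWithDampening
-- ===== SOURCE A (Python) =====
-- def isReportSafeWithDampening(report):
--     isAscending = None
--     for i in range(len(report) - 1):
--         step = abs(report[i] - report[i+1])
--         if  step <= 3 and step >= 1:
--             if isAscending == None:
--                 isAscending = True if report[i] < report[i+1] else False
--             if (isAscending and report[i] > report[i+1]) or (not isAscending and report[i] < report[i+1]):
--                 return False
--         else:
--             return False
--     return True
-- ===== SOURCE B (Python) =====
-- def isReportSafeWithDampening(report):
--     diffs = [b - a for a, b in zip(report, report[1:])]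
--     return all(1 <= d <= 3 for d in diffs) or all(-3 <= d <= -1 for d in diffs)
-- ===== Notes on version B (the rewrite author's own statement) =====
-- stated objective: simpler
-- what changed: Replaced A's single stateful pass (isAscending flag set on the first step, per-step early returns) by building the list of consecutive differences once and taking the OR of two independent stateless full scans (all diffs in [1,3], or all in [-3,-1]).
import Mathlib
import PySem

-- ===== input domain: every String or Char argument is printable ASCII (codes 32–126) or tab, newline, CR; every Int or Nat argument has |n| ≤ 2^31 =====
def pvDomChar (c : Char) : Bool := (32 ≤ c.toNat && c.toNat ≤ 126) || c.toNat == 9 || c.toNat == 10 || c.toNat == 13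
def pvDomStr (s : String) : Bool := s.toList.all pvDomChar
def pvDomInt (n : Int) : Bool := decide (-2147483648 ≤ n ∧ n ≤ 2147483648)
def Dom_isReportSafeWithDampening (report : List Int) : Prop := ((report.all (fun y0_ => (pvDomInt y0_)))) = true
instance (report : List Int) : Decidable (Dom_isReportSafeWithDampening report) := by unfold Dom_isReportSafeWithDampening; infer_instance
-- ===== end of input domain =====

-- B replaces A's stateful single pass (isAscending flag, per-step early return) by building the
-- consecutive-difference list once and doing two independent full scans (all ascending / all
-- descending); objective: simpler.

-- ===== PORT A =====
-- the for-loop over range(len(report)-1) with early 'return False', state isAscending : Option Bool.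
-- Indices i, i+1 are always in range here, so pyGetD with default 0 is exact.
def pvLoopA (report : List Int) : List Int → Option Bool → Bool
  | [], _ => true
  | i :: rest, isAscending =>
    let a := PySem.List.pyGetD report i 0
    let b := PySem.List.pyGetD report (i + 1) 0
    let step := |a - b|
    if step ≤ 3 ∧ step ≥ 1 then
      let isAscending := if isAscending = none then (if a < b then some true else some false) else isAscending
      if (isAscending = some true ∧ a > b) ∨ (¬ isAscending = some true ∧ a < b) then false
      else pvLoopA report rest isAscending
    else false

def isReportSafeWithDampening (report : List Int) : Bool :=
  pvLoopA report (PySem.List.pyRange 0 ((report.length : Int) - 1) 1) none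

-- ===== PORT B =====
-- diffs = [b - a for a, b in zip(report, report[1:])]; then two full 'all' scans.
def isReportSafeWithDampening_alt (report : List Int) : Bool :=
  let diffs := (report.zip (PySem.List.slice report (some 1) none)).map (fun p => p.2 - p.1)
  diffs.all (fun d => decide (1 ≤ d) && decide (d ≤ 3)) ||
    diffs.all (fun d => decide (-3 ≤ d) && decide (d ≤ -1))

-- ===== PRECONDITION & SPEC =====
def Spec_isReportSafeWithDampening (report : List Int) (out : Bool) : Prop := out = isReportSafeWithDampening_alt report
instance (report : List Int) (out : Bool) : Decidable (Spec_isReportSafeWithDampening report out) := by unfold Spec_isReportSafeWithDampening; infer_instance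

-- ===== CLAIM (what is proved, stated in full; the proofs are below) =====
def Claim_equal_isReportSafeWithDampening : Prop := ∀ (report : List Int), Dom_isReportSafeWithDampening report → Spec_isReportSafeWithDampening report (isReportSafeWithDampening report)

-- ===== LEMMAS AND PROOFS =====

-- A's loop, rephrased as structural recursion on the suffix of the report.
def pvG : List Int → Option Bool → Bool
  | [], _ => true
  | [_], _ => true
  | a :: b :: t, isAscending =>
    let step := |a - b|
    if step ≤ 3 ∧ step ≥ 1 then
      let isAscending := if isAscending = none then (if a < b then some true else some false) else isAscending
      if (isAscending = some true ∧ a > b) ∨ (¬ isAscending = some true ∧ a < b) then false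
      else pvG (b :: t) isAscending
    else false

-- "all consecutive differences lie in [lo, hi]"
def pvAllD (lo hi : Int) : List Int → Bool
  | [] => true
  | [_] => true
  | a :: b :: t => (decide (lo ≤ b - a) && decide (b - a ≤ hi)) && pvAllD lo hi (b :: t)

lemma pvLoopA_eq_pvG (xs : List Int) :
    ∀ (n i : Nat) (asc : Option Bool), xs.length - i = n →
      pvLoopA xs (PySem.List.pyRange i ((xs.length : Int) - 1) 1) asc = pvG (xs.drop i) asc := by
  intro n
  induction n with
  | zero =>
    intro i asc h
    have hi : xs.length ≤ i := by omega
    rw [PySem.List.pyRange_one_eq_nil (by omega)]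
    rw [List.drop_eq_nil_of_le hi]
    rfl
  | succ n ih =>
    intro i asc h
    by_cases hlt : i + 1 < xs.length
    · have hcons : PySem.List.pyRange i ((xs.length : Int) - 1) 1
          = (i : Int) :: PySem.List.pyRange ((i : Int) + 1) ((xs.length : Int) - 1) 1 :=
        PySem.List.pyRange_one_cons (by omega)
      have ha : ∃ a b t, xs.drop i = a :: b :: t := by
        have h1 : i < xs.length := by omega
        have h2 : i + 1 < xs.length := hlt
        refine ⟨xs[i], xs[i+1], xs.drop (i+2), ?_⟩
        rw [List.drop_eq_getElem_cons h1, List.drop_eq_getElem_cons h2]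
      obtain ⟨a, b, t, hd⟩ := ha
      have h0 : (List.drop i xs)[(0:Nat)]? = xs[i+0]? := List.getElem?_drop
      have h1 : (List.drop i xs)[(1:Nat)]? = xs[i+1]? := List.getElem?_drop
      rw [hd] at h0 h1
      simp at h0 h1
      have hga : PySem.List.pyGetD xs (i : Int) 0 = a := by
        rw [PySem.List.pyGetD_natCast, List.getD_eq_getElem?_getD, ← h0]
        rfl
      have hgb : PySem.List.pyGetD xs ((i : Int) + 1) 0 = b := by
        have hc : ((i : Int) + 1) = ((i + 1 : Nat) : Int) := by push_cast; ring
        rw [hc, PySem.List.pyGetD_natCast, List.getD_eq_getElem?_getD, ← h1]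
        rfl
      have htail : xs.drop (i + 1) = b :: t := by
        have hdd : List.drop 1 (List.drop i xs) = List.drop (i + 1) xs := List.drop_drop
        rw [hd] at hdd
        simpa using hdd.symm
      rw [hcons, hd]
      show pvLoopA xs ((i : Int) :: _) asc = pvG (a :: b :: t) asc
      rw [pvLoopA, pvG]
      simp only [hga, hgb]
      by_cases hstep : |a - b| ≤ 3 ∧ |a - b| ≥ 1
      · simp only [if_pos hstep]
        set asc' := if asc = none then (if a < b then some true else some false) else asc with hasc'
        by_cases hret : (asc' = some true ∧ a > b) ∨ (¬ asc' = some true ∧ a < b)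
        · simp only [if_pos hret]
        · simp only [if_neg hret]
          have := ih (i + 1) asc' (by omega)
          rw [htail] at this
          simpa using this
      · simp only [if_neg hstep]
    · -- fewer than two elements remain: range empty or singleton-tail; both sides true
      have hnil : PySem.List.pyRange i ((xs.length : Int) - 1) 1 = [] :=
        PySem.List.pyRange_one_eq_nil (by omega)
      rw [hnil]
      rcases hxd : xs.drop i with _ | ⟨a, t⟩
      · rfl
      · rcases ht : t with _ | ⟨b, t'⟩
        · rfl
        · exfalso
          have : (xs.drop i).length = xs.length - i := List.length_drop ..
          rw [hxd, ht] at this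
          simp at this
          omega

lemma pvG_some (c : Bool) (xs : List Int) :
    pvG xs (some c) = pvAllD (if c then 1 else -3) (if c then 3 else -1) xs := by
  induction xs with
  | nil => rfl
  | cons a t ih =>
    rcases t with _ | ⟨b, t'⟩
    · rfl
    · simp only [pvG, pvAllD, reduceCtorEq, if_false, ih]
      rcases abs_cases (a - b) with ⟨he, hge⟩ | ⟨he, hge⟩ <;> rw [he] <;>
        cases c <;> split_ifs <;> simp_all <;> omega

lemma pvG_none (xs : List Int) :
    pvG xs none = (pvAllD 1 3 xs || pvAllD (-3) (-1) xs) := by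
  rcases xs with _ | ⟨a, t⟩
  · rfl
  rcases t with _ | ⟨b, t'⟩
  · rfl
  have hup := pvG_some true (b :: t')
  have hdn := pvG_some false (b :: t')
  norm_num at hup hdn
  simp only [pvG, pvAllD, if_true]
  by_cases hc1 : 1 ≤ b - a ∧ b - a ≤ 3
  · have hab : a < b := by omega
    have hstep : |a - b| ≤ 3 ∧ |a - b| ≥ 1 := by
      rw [abs_sub_comm, abs_of_nonneg (by omega : (0:Int) ≤ b - a)]; omega
    rw [if_pos hstep, if_pos hab, if_neg (by simp; omega), hup]
    have hx : (decide (1 ≤ b - a) && decide (b - a ≤ 3)) = true := by simp; omega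
    have hy : (decide (-3 ≤ b - a) && decide (b - a ≤ -1)) = false := by simp; omega
    rw [hx, hy]
    simp
  · by_cases hc2 : -3 ≤ b - a ∧ b - a ≤ -1
    · have hab : ¬ a < b := by omega
      have hstep : |a - b| ≤ 3 ∧ |a - b| ≥ 1 := by
        rw [abs_sub_comm, abs_of_nonpos (by omega : b - a ≤ (0:Int))]; omega
      rw [if_pos hstep, if_neg hab, if_neg (by simp; omega), hdn]
      have hx : (decide (1 ≤ b - a) && decide (b - a ≤ 3)) = false := by simp; omega
      have hy : (decide (-3 ≤ b - a) && decide (b - a ≤ -1)) = true := by simp; omega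
      rw [hx, hy]
      simp
    · have hstep : ¬ (|a - b| ≤ 3 ∧ |a - b| ≥ 1) := by
        rcases abs_cases (a - b) with ⟨he, _⟩ | ⟨he, _⟩ <;> rw [he] <;> omega
      rw [if_neg hstep]
      have hx : (decide (1 ≤ b - a) && decide (b - a ≤ 3)) = false := by simp; omega
      have hy : (decide (-3 ≤ b - a) && decide (b - a ≤ -1)) = false := by simp; omega
      rw [hx, hy]
      simp

lemma all_zip_allD (lo hi : Int) (xs : List Int) :
    ((xs.zip xs.tail).map (fun p => p.2 - p.1)).all
        (fun d => decide (lo ≤ d) && decide (d ≤ hi)) = pvAllD lo hi xs := by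
  induction xs with
  | nil => rfl
  | cons a t ih =>
    rcases t with _ | ⟨b, t'⟩
    · rfl
    · simp only [List.tail_cons, List.zip_cons_cons, List.map_cons, List.all_cons] at *
      rw [pvAllD, ih]

lemma alt_eq_allD (xs : List Int) :
    isReportSafeWithDampening_alt xs = (pvAllD 1 3 xs || pvAllD (-3) (-1) xs) := by
  rw [isReportSafeWithDampening_alt, PySem.List.slice_from_one]
  simp only [all_zip_allD]

-- ===== VERDICT (by name: the statement is the Claim_ definition above) =====
theorem isReportSafeWithDampening_spec : Claim_equal_isReportSafeWithDampening := by
  intro report _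
  unfold Spec_isReportSafeWithDampening
  rw [isReportSafeWithDampening]
  have h := pvLoopA_eq_pvG report report.length 0 none rfl
  simp only [Nat.cast_zero, List.drop_zero] at h
  rw [h, pvG_none, alt_eq_allD]
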